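-- pv_equiv track=rewrite | github.com/Dingzhen778/Swebench_in_Siflow | agentless_parser.py | split_edit_multifile_commands
-- ===== SOURCE A (Python) =====
-- from collections import OrderedDict
--
-- def split_edit_multifile_commands(commands, diff_format=False) -> dict:
--     """拆分多文件编辑命令"""
--     file_to_commands = OrderedDict()
--
--     if diff_format:
--         for command in commands:
--             file_name = None
--             for subcommand in command.split(">>>>>>> REPLACE")[:-1]:
--                 subcommand = subcommand.strip()
--                 if "<<<<<<< SEARCH" in subcommand:
--                     fn = subcommand.split("<<<<<<< SEARCH")[0].lstrip("#").strip()
--                     if fn: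
--                         file_name = "'" + fn + "'"
--
--                 if len(subcommand.split("<<<<<<< SEARCH")) != 2:
--                     continue
--
--                 converted_command = (
--                     "<<<<<<< SEARCH"
--                     + subcommand.split("<<<<<<< SEARCH")[1]
--                     + "\n"
--                     + ">>>>>>> REPLACE"
--                 )
--
--                 # 去重
--                 if (
--                     file_name not in file_to_commands
--                     or converted_command not in file_to_commands[file_name]
--                 ):
--                     file_to_commands.setdefault(file_name, []).append(converted_command)
--
--     return file_to_commands
-- ===== SOURCE B (Python) =====
-- from collections import OrderedDict
--
-- SEARCH = "<<<<<<< SEARCH"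
-- REPLACE = ">>>>>>> REPLACE"
--
--
-- def _subcommands(command):
--     return [s.strip() for s in command.split(REPLACE)[:-1]]
--
--
-- def _name_of(sub):
--     """The quoted file name a subcommand declares, or None if it declares none."""
--     parts = sub.split(SEARCH)
--     if len(parts) < 2:
--         return None
--     fn = parts[0].lstrip("#").strip()
--     return "'" + fn + "'" if fn else None
--
--
-- def _pairs(commands):
--     """Flat ordered list of (file_name, converted_command) pairs."""
--     pairs = []
--     for command in commands:
--         subs = _subcommands(command)
--         names = [_name_of(s) for s in subs]
--         # carry the last declared name forward (a file name persists across subcommands)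
--         carried = []
--         cur = None
--         for nm in names:
--             if nm is not None:
--                 cur = nm
--             carried.append(cur)
--         for sub, fn in zip(subs, carried):
--             parts = sub.split(SEARCH)
--             if len(parts) == 2:
--                 pairs.append((fn, SEARCH + parts[1] + "\n" + REPLACE))
--     return pairs
--
--
-- def split_edit_multifile_commands(commands, diff_format=False) -> dict:
--     """Group-by: distinct files in first-occurrence order, then per-file dedup scans."""
--     result = OrderedDict()
--     if not diff_format:
--         return result
--     pairs = _pairs(commands)
--     files = []
--     for fn, _ in pairs:
--         if fn not in files:
--             files.append(fn)
--     for f in files: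
--         cmds = []
--         for fn, c in pairs:
--             if fn == f and c not in cmds:
--                 cmds.append(c)
--         result[f] = cmds
--     return result
-- ===== Notes on version B (the rewrite author's own statement) =====
-- stated objective: alternative
-- what changed: A interleaves parsing with incremental OrderedDict accumulation (carrying file_name mutably and deduplicating via setdefault/append under a membership test); B instead computes each subcommand's declared name independently, performs a separate carry pass to propagate names, flattens everything to a (file, command) pair list, and then builds the result by a group-by: one scan collecting distinct files in first-occurrence order and, per file, a rescan of the pair list collecting its distinct commands — no dict is consulted during parsing at all.
import Mathlib
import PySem

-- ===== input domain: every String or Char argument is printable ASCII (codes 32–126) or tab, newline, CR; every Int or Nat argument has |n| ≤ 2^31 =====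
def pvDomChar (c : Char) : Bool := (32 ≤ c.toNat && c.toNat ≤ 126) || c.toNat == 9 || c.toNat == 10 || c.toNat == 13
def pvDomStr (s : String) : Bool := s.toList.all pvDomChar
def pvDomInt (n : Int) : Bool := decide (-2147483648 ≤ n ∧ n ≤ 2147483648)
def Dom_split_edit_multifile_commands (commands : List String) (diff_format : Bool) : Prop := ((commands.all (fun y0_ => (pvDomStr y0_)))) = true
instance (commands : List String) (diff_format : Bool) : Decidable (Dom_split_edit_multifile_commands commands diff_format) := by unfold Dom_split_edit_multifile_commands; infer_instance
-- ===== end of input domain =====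

-- B replaces A's interleaved parse-and-accumulate loop (mutable carried file_name,
-- incremental OrderedDict with setdefault/append dedup) by staged passes: per-subcommand
-- declared names, a carry pass, a flat pair list, then a group-by with per-file dedup
-- rescans; same return value, proved equal.

def pvSepS : List Char := "<<<<<<< SEARCH".toList
def pvSepR : List Char := ">>>>>>> REPLACE".toList

-- exact port of Python's str.lstrip("#"): drop the leading '#' characters
def pvLstripHash (cs : List Char) : List Char := cs.dropWhile (fun c => c == '#')

-- ===== PORT A =====
-- state = (file_to_commands, file_name); one step = the body of A's inner `for subcommand …` loop
def pvAStep (st : PySem.Dict (Option String) (List String) × Option String) (raw : List Char) :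
    PySem.Dict (Option String) (List String) × Option String :=
  let subcommand := PySem.Chars.strip raw
  let file_name :=
    if PySem.Chars.isIn pvSepS subcommand then
      let fn := PySem.Chars.strip (pvLstripHash (PySem.List.pyGetD (PySem.Chars.splitOn subcommand pvSepS) 0 []))
      if fn ≠ [] then some (String.mk ('\'' :: (fn ++ ['\'']))) else st.2
    else st.2
  if (PySem.Chars.splitOn subcommand pvSepS).length ≠ 2 then (st.1, file_name)
  else
    let converted := String.mk (pvSepS ++ PySem.List.pyGetD (PySem.Chars.splitOn subcommand pvSepS) 1 [] ++ '\n' :: pvSepR)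
    if !(st.1.contains file_name) || !((st.1.getD file_name []).contains converted) then
      -- file_to_commands.setdefault(file_name, []).append(converted_command)
      (st.1.modify file_name [] (fun l => l ++ [converted]), file_name)
    else (st.1, file_name)

def split_edit_multifile_commands (commands : List String) (diff_format : Bool) : List (Option String × List String) :=
  (if diff_format then
    commands.foldl (fun d command =>
      ((PySem.List.slice (PySem.Chars.splitOn command.toList pvSepR) none (some (-1))).foldl
        pvAStep (d, none)).1) PySem.Dict.empty
   else PySem.Dict.empty).items

-- ===== PORT B =====
-- _subcommands: the stripped `command.split(REPLACE)[:-1]` pieces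
def pvSubcommands (command : String) : List (List Char) :=
  (PySem.List.slice (PySem.Chars.splitOn command.toList pvSepR) none (some (-1))).map PySem.Chars.strip

-- _name_of: the quoted file name a subcommand declares, or none
def pvNameOf (sub : List Char) : Option String :=
  let parts := PySem.Chars.splitOn sub pvSepS
  if parts.length < 2 then none
  else
    let fn := PySem.Chars.strip (pvLstripHash (PySem.List.pyGetD parts 0 []))
    if fn ≠ [] then some (String.mk ('\'' :: (fn ++ ['\'']))) else none

-- the carry pass: propagate the last declared name forward (cur starts at None)
def pvCarry (names : List (Option String)) : List (Option String) :=
  (names.foldl (fun (st : List (Option String) × Option String) nm =>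
      let cur := match nm with | some q => some q | none => st.2
      (st.1 ++ [cur], cur)) ([], none)).1

-- body of B's `for sub, fn in zip(subs, carried)` loop
def pvEmitStep (acc : List (Option String × String)) (p : List Char × Option String) :
    List (Option String × String) :=
  let parts := PySem.Chars.splitOn p.1 pvSepS
  if parts.length = 2 then
    acc ++ [(p.2, String.mk (pvSepS ++ PySem.List.pyGetD parts 1 [] ++ '\n' :: pvSepR))]
  else acc

-- _pairs: flat ordered list of (file_name, converted_command) pairs
def pvPairs (commands : List String) : List (Option String × String) :=
  commands.foldl (fun ps command =>
    let subs := pvSubcommands command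
    (subs.zip (pvCarry (subs.map pvNameOf))).foldl pvEmitStep ps) []

-- per-file dedup rescan of the pair list
def pvBucket (pairs : List (Option String × String)) (f : Option String) : List String :=
  pairs.foldl (fun cs p => if p.1 == f && !(cs.contains p.2) then cs ++ [p.2] else cs) []

def split_edit_multifile_commands_alt (commands : List String) (diff_format : Bool) : List (Option String × List String) :=
  (if diff_format then
    let pairs := pvPairs commands
    let files := pairs.foldl (fun ks p => if ks.contains p.1 then ks else ks ++ [p.1])
      ([] : List (Option String))
    files.foldl (fun d f => d.insert f (pvBucket pairs f)) PySem.Dict.empty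
  else PySem.Dict.empty).items

-- ===== PRECONDITION & SPEC =====
def Spec_split_edit_multifile_commands (commands : List String) (diff_format : Bool) (out : List (Option String × List String)) : Prop := out = split_edit_multifile_commands_alt commands diff_format
instance (commands : List String) (diff_format : Bool) (out : List (Option String × List String)) : Decidable (Spec_split_edit_multifile_commands commands diff_format out) := by unfold Spec_split_edit_multifile_commands; infer_instance

-- ===== CLAIM (what is proved, stated in full; the proofs are below) =====
def Claim_equal_split_edit_multifile_commands : Prop := ∀ (commands : List String) (diff_format : Bool), Dom_split_edit_multifile_commands commands diff_format → Spec_split_edit_multifile_commands commands diff_format (split_edit_multifile_commands commands diff_format)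

-- ===== LEMMAS AND PROOFS =====

-- ---- proof-side recursive descriptions of the shared parse content ----

-- carryF fn names: the carried name sequence starting from fn
def carryF (fn : Option String) : List (Option String) → List (Option String)
  | [] => []
  | nm :: t =>
    let cur := match nm with | some q => some q | none => fn
    cur :: carryF cur t

def lastC (fn : Option String) : List (Option String) → Option String
  | [] => fn
  | nm :: t => lastC (match nm with | some q => some q | none => fn) t

-- the pairs one command's (unstripped) subcommand list emits, starting from carried name fn
def emitOf (fn : Option String) : List (List Char) → List (Option String × String)
  | [] => []
  | raw :: t =>
    let sub := PySem.Chars.strip raw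
    let parts := PySem.Chars.splitOn sub pvSepS
    let cur := match pvNameOf sub with | some q => some q | none => fn
    (if parts.length = 2 then
      [(cur, String.mk (pvSepS ++ PySem.List.pyGetD parts 1 [] ++ '\n' :: pvSepR))]
     else []) ++ emitOf cur t

-- A's dedup-accumulation step, on a flat pair
def stepG (d : PySem.Dict (Option String) (List String)) (p : Option String × String) :
    PySem.Dict (Option String) (List String) :=
  if !(d.contains p.1) || !((d.getD p.1 []).contains p.2) then
    d.modify p.1 [] (fun l => l ++ [p.2])
  else d

-- ---- A's substring test agrees with the part-count test ----
theorem pv_splitOn_go_two_le (sep : List Char) (hsep : sep ≠ []) :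
    ∀ (fuel : Nat) (l cur : List Char) (acc : List (List Char)), l.length < fuel →
      (2 ≤ (PySem.Chars.splitOn.go sep fuel l cur acc).length ↔
        (acc ≠ [] ∨ ∃ j, sep <+: l.drop j)) := by
  intro fuel
  induction fuel with
  | zero => intro l cur acc h; omega
  | succ n ih =>
    intro l cur acc h
    match l with
    | [] =>
      rw [show PySem.Chars.splitOn.go sep (n+1) [] cur acc = (cur.reverse :: acc).reverse by
        simp [PySem.Chars.splitOn.go]]
      simp only [List.drop_nil, List.prefix_nil, hsep, exists_const, or_false,
        List.length_reverse, List.length_cons]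
      cases acc <;> simp
    | c :: rest =>
      by_cases hp : sep.isPrefixOf (c :: rest)
      · rw [show PySem.Chars.splitOn.go sep (n+1) (c :: rest) cur acc =
            PySem.Chars.splitOn.go sep n (List.drop sep.length (c :: rest)) [] (cur.reverse :: acc) by
              simp [PySem.Chars.splitOn.go, hp]]
        rw [ih _ _ _ (by
          have h1 : 1 ≤ sep.length := by cases sep <;> simp_all
          have h2 : (c :: rest).length = rest.length + 1 := by simp
          simp only [List.length_drop]
          omega)]
        constructor
        · intro _; right; exact ⟨0, by simpa using (List.isPrefixOf_iff_prefix.mp hp)⟩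
        · intro _; left; simp
      · rw [show PySem.Chars.splitOn.go sep (n+1) (c :: rest) cur acc =
            PySem.Chars.splitOn.go sep n rest (c :: cur) acc by
              simp [PySem.Chars.splitOn.go, hp]]
        rw [ih _ _ _ (by simp at h ⊢; omega)]
        constructor
        · rintro (ha | ⟨j, hj⟩)
          · exact Or.inl ha
          · exact Or.inr ⟨j + 1, by simpa using hj⟩
        · rintro (ha | ⟨j, hj⟩)
          · exact Or.inl ha
          · cases j with
            | zero =>
              exact absurd (List.isPrefixOf_iff_prefix.mpr (by simpa using hj)) hp
            | succ j' => exact Or.inr ⟨j', by simpa using hj⟩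

theorem pv_isIn_iff_two_le (s : List Char) :
    PySem.Chars.isIn pvSepS s = true ↔ 2 ≤ (PySem.Chars.splitOn s pvSepS).length := by
  rw [← PySem.Chars.exists_prefix_drop_iff_isIn]
  rw [show PySem.Chars.splitOn s pvSepS = PySem.Chars.splitOn.go pvSepS (s.length + 1) s [] [] from rfl]
  rw [pv_splitOn_go_two_le pvSepS (by decide) (s.length + 1) s [] [] (by omega)]
  simp

-- A's file_name update on one subcommand is the carry step on pvNameOf
theorem pv_fn_update (raw : List Char) (fn : Option String) :
    (if PySem.Chars.isIn pvSepS (PySem.Chars.strip raw) then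
      let f := PySem.Chars.strip (pvLstripHash
        (PySem.List.pyGetD (PySem.Chars.splitOn (PySem.Chars.strip raw) pvSepS) 0 []))
      if f ≠ [] then some (String.mk ('\'' :: (f ++ ['\'']))) else fn
     else fn)
    = (match pvNameOf (PySem.Chars.strip raw) with | some q => some q | none => fn) := by
  by_cases h2 : 2 ≤ (PySem.Chars.splitOn (PySem.Chars.strip raw) pvSepS).length
  · rw [if_pos ((pv_isIn_iff_two_le _).mpr h2)]
    simp only [pvNameOf,
      if_neg (show ¬ (PySem.Chars.splitOn (PySem.Chars.strip raw) pvSepS).length < 2 by omega)]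
    split <;> simp
  · rw [if_neg (fun hc => h2 ((pv_isIn_iff_two_le _).mp hc))]
    simp only [pvNameOf,
      if_pos (show (PySem.Chars.splitOn (PySem.Chars.strip raw) pvSepS).length < 2 by omega)]

-- ---- Part 1: A's interleaved fold = stepG folded over the emitted pairs ----

theorem pv_astep_eq (d : PySem.Dict (Option String) (List String)) (fn : Option String)
    (raw : List Char) :
    pvAStep (d, fn) raw =
      ((emitOf fn [raw]).foldl stepG d,
       match pvNameOf (PySem.Chars.strip raw) with | some q => some q | none => fn) := by
  simp only [pvAStep, emitOf, List.append_nil]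
  rw [pv_fn_update raw fn]
  by_cases hl : (PySem.Chars.splitOn (PySem.Chars.strip raw) pvSepS).length = 2
  · simp only [hl, ne_eq, not_true_eq_false, if_false]
    simp only [if_true, List.foldl_cons, List.foldl_nil, stepG]
    split <;> split <;> rfl
  · simp [hl]

theorem pv_emitOf_cons (fn : Option String) (raw : List Char) (t : List (List Char)) :
    emitOf fn (raw :: t) =
      emitOf fn [raw] ++ emitOf (match pvNameOf (PySem.Chars.strip raw) with
        | some q => some q | none => fn) t := by
  simp only [emitOf, List.append_nil]

theorem pv_inner_eq (subs : List (List Char)) :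
    ∀ (d : PySem.Dict (Option String) (List String)) (fn : Option String),
      subs.foldl pvAStep (d, fn) = ((emitOf fn subs).foldl stepG d, lastC fn (subs.map (fun r => pvNameOf (PySem.Chars.strip r)))) := by
  induction subs with
  | nil => intro d fn; simp [emitOf, lastC]
  | cons raw t ih =>
    intro d fn
    simp only [List.foldl_cons, List.map_cons]
    rw [pv_astep_eq d fn raw, ih, pv_emitOf_cons fn raw t, List.foldl_append]
    rfl

-- A (with diff_format) = stepG folded over the flat pair list
def pairsOf (commands : List String) : List (Option String × String) :=
  commands.foldl (fun ps command =>
    ps ++ emitOf none (PySem.List.slice (PySem.Chars.splitOn command.toList pvSepR) none (some (-1)))) []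

theorem pv_pairsOf_acc (commands : List String) :
    ∀ ps, commands.foldl (fun ps command =>
      ps ++ emitOf none (PySem.List.slice (PySem.Chars.splitOn command.toList pvSepR) none (some (-1)))) ps
      = ps ++ pairsOf commands := by
  intro ps
  rw [pairsOf, PySem.List.foldl_append_eq_flatMap, PySem.List.foldl_append_eq_flatMap]
  simp

theorem pv_a_eq_stepG (commands : List String) :
    ∀ (d : PySem.Dict (Option String) (List String)),
      commands.foldl (fun d command =>
        ((PySem.List.slice (PySem.Chars.splitOn command.toList pvSepR) none (some (-1))).foldl
          pvAStep (d, none)).1) d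
      = (pairsOf commands).foldl stepG d := by
  induction commands with
  | nil => intro d; rfl
  | cons c t ih =>
    intro d
    simp only [List.foldl_cons]
    rw [pv_inner_eq, ih]
    rw [show pairsOf (c :: t) = emitOf none (PySem.List.slice (PySem.Chars.splitOn c.toList pvSepR) none (some (-1))) ++ pairsOf t by
      rw [pairsOf]
      simp only [List.foldl_cons, List.nil_append]
      rw [pv_pairsOf_acc]]
    rw [List.foldl_append]

-- ---- Part 2: B's staged parse produces the same flat pair list ----

theorem pv_carry_acc (names : List (Option String)) :
    ∀ (acc : List (Option String)) (fn : Option String),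
      names.foldl (fun (st : List (Option String) × Option String) nm =>
        let cur := match nm with | some q => some q | none => st.2
        (st.1 ++ [cur], cur)) (acc, fn)
      = (acc ++ carryF fn names, lastC fn names) := by
  induction names with
  | nil => intro acc fn; simp [carryF, lastC]
  | cons nm t ih =>
    intro acc fn
    simp only [List.foldl_cons, carryF, lastC]
    rw [ih]
    simp

theorem pv_emit_acc (l : List (List Char × Option String)) :
    ∀ acc, l.foldl pvEmitStep acc = acc ++ l.foldl pvEmitStep [] := by
  have he : ∀ acc p, pvEmitStep acc p = acc ++ pvEmitStep [] p := by
    intro acc p; simp only [pvEmitStep]; split <;> simp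
  induction l with
  | nil => intro acc; simp
  | cons p t ih =>
    intro acc
    simp only [List.foldl_cons]
    rw [he acc p, ih, ih (pvEmitStep [] p), List.append_assoc]

-- the zip-with-carried fold is emitOf
theorem pv_zip_emit (subs : List (List Char)) :
    ∀ fn, ((subs.map PySem.Chars.strip).zip
        (carryF fn ((subs.map PySem.Chars.strip).map pvNameOf))).foldl pvEmitStep []
      = emitOf fn subs := by
  induction subs with
  | nil => intro fn; simp [emitOf]
  | cons raw t ih =>
    intro fn
    simp only [List.map_cons, carryF, List.zip_cons_cons, List.foldl_cons]
    rw [pv_emit_acc, ih]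
    simp only [pvEmitStep, emitOf]
    split <;> simp

theorem pv_pairs_eq (commands : List String) : pvPairs commands = pairsOf commands := by
  have h : ∀ (cs : List String) (ps : List (Option String × String)),
      cs.foldl (fun ps command =>
        let subs := pvSubcommands command
        (subs.zip (pvCarry (subs.map pvNameOf))).foldl pvEmitStep ps) ps
      = ps ++ pairsOf cs := by
    intro cs
    induction cs with
    | nil => intro ps; simp [pairsOf]
    | cons c t ih =>
      intro ps
      simp only [List.foldl_cons]
      rw [ih]
      have hstep : ((pvSubcommands c).zip (pvCarry (List.map pvNameOf (pvSubcommands c)))).foldl pvEmitStep ps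
          = ps ++ emitOf none (PySem.List.slice (PySem.Chars.splitOn c.toList pvSepR) none (some (-1))) := by
        simp only [pvSubcommands, pvCarry, pv_carry_acc, List.nil_append]
        rw [pv_emit_acc, pv_zip_emit]
      rw [show pairsOf (c :: t) = emitOf none (PySem.List.slice (PySem.Chars.splitOn c.toList pvSepR) none (some (-1))) ++ pairsOf t by
        rw [pairsOf]
        simp only [List.foldl_cons, List.nil_append]
        rw [pv_pairsOf_acc]]
      rw [hstep, List.append_assoc]
  simpa [pairsOf] using h commands []

-- ---- Part 3: the stepG fold's items are B's group-by ----

-- the distinct keys of ps in first-occurrence order (B's `files` loop)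
def keysOf (ps : List (Option String × String)) : List (Option String) :=
  ps.foldl (fun ks p => if ks.contains p.1 then ks else ks ++ [p.1]) []

theorem pv_keysOf_eq_ofList (ps : List (Option String × String)) :
    keysOf ps = PySem.Set.ofList (ps.map (fun p => p.1)) := by
  rw [← PySem.Set.update_nil_left, PySem.Set.update_map_eq_foldl_add]
  rfl

theorem pv_bucket_snoc (ps : List (Option String × String)) (p : Option String × String)
    (f : Option String) :
    pvBucket (ps ++ [p]) f =
      if p.1 == f && !((pvBucket ps f).contains p.2) then pvBucket ps f ++ [p.2]
      else pvBucket ps f := by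
  simp [pvBucket, List.foldl_append]

theorem pv_bucket_of_not_mem (ps : List (Option String × String)) (f : Option String)
    (h : f ∉ ps.map (fun p => p.1)) : pvBucket ps f = [] := by
  induction ps using List.reverseRecOn with
  | nil => rfl
  | append_singleton t p ih =>
    simp only [List.map_append, List.map_cons, List.map_nil] at h
    rw [pv_bucket_snoc, ih (fun hm => h (List.mem_append_left _ hm))]
    have : (p.1 == f) = false := by
      simp only [beq_eq_false_iff_ne, ne_eq]
      intro he; exact h (by simp [he])
    simp [this]

theorem pv_stepG_dup (d : PySem.Dict (Option String) (List String)) (p : Option String × String)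
    (h1 : d.contains p.1 = true) (h2 : (d.getD p.1 []).contains p.2 = true) : stepG d p = d := by
  unfold stepG; rw [h1, h2]; rfl

theorem pv_stepG_add (d : PySem.Dict (Option String) (List String)) (p : Option String × String)
    (h2 : (d.getD p.1 []).contains p.2 = false) :
    stepG d p = d.insert p.1 (d.getD p.1 [] ++ [p.2]) := by
  unfold stepG; rw [h2]
  cases h1 : d.contains p.1 <;> rfl

theorem pv_contains_false_of_not_mem {l : List String} {x : String} (h : x ∉ l) :
    l.contains x = false := by
  cases hc : l.contains x with
  | false => rfl
  | true => exact absurd (List.mem_of_elem_eq_true hc) h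

theorem pv_items_stepG (ps : List (Option String × String)) :
    (ps.foldl stepG PySem.Dict.empty).items
      = (keysOf ps).map (fun f => (f, pvBucket ps f)) := by
  induction ps using List.reverseRecOn with
  | nil => rfl
  | append_singleton t p ih =>
    have hkeys : (t.foldl stepG PySem.Dict.empty).keys = keysOf t := by
      show ((t.foldl stepG PySem.Dict.empty).items.map (fun q => q.1)) = keysOf t
      rw [ih, List.map_map]
      exact List.map_id'' (congrFun rfl) _
    have hnodup : (t.foldl stepG PySem.Dict.empty).keys.Nodup := by
      rw [hkeys, pv_keysOf_eq_ofList]; exact PySem.Set.nodup_ofList _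
    have hknodup : (keysOf t).Nodup := by
      rw [pv_keysOf_eq_ofList]; exact PySem.Set.nodup_ofList _
    rw [List.foldl_append, List.foldl_cons, List.foldl_nil]
    have hkeq : keysOf (t ++ [p]) =
        if (keysOf t).contains p.1 then keysOf t else keysOf t ++ [p.1] := by
      simp [keysOf, List.foldl_append]
    by_cases hmem : p.1 ∈ keysOf t
    · have hcont : (t.foldl stepG PySem.Dict.empty).contains p.1 = true := by
        rw [PySem.Dict.contains_iff_mem_keys, hkeys]; exact hmem
      have hitem : (p.1, pvBucket t p.1) ∈ (t.foldl stepG PySem.Dict.empty).items := by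
        rw [ih]; exact List.mem_map_of_mem hmem
      have hgetD : (t.foldl stepG PySem.Dict.empty).getD p.1 [] = pvBucket t p.1 :=
        PySem.Dict.getD_of_mem_items _ hitem hnodup []
      rw [hkeq, if_pos (by simpa using hmem)]
      by_cases hin : p.2 ∈ pvBucket t p.1
      · -- duplicate: dict unchanged, every bucket unchanged
        rw [pv_stepG_dup _ _ hcont (by rw [hgetD]; exact List.elem_eq_true_of_mem hin)]
        rw [ih]
        apply List.map_congr_left
        intro f hf
        rw [pv_bucket_snoc]
        by_cases hfp : p.1 = f
        · subst hfp
          simp [hin]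
        · simp [show (p.1 == f) = false by simpa using hfp]
      · -- new command for an existing file: value replaced in place
        rw [pv_stepG_add _ _ (by rw [hgetD]; exact pv_contains_false_of_not_mem hin), hgetD]
        rw [PySem.Dict.items_insert_of_contains _ _ hcont, ih, List.map_map]
        apply List.map_congr_left
        intro f hf
        simp only [Function.comp_apply]
        rw [pv_bucket_snoc]
        by_cases hfp : p.1 = f
        · subst hfp; simp [hin]
        · simp [show (p.1 == f) = false by simpa using hfp,
            show (f == p.1) = false by simpa using Ne.symm hfp]
    · have hcont : (t.foldl stepG PySem.Dict.empty).contains p.1 = false := by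
        rw [show (t.foldl stepG PySem.Dict.empty).contains p.1 =
          decide (p.1 ∈ (t.foldl stepG PySem.Dict.empty).keys) from
            PySem.Dict.contains_eq_decide_mem_keys _ _]
        rw [hkeys]; simpa using hmem
      have hb : pvBucket t p.1 = [] := by
        apply pv_bucket_of_not_mem
        rw [pv_keysOf_eq_ofList] at hmem
        intro hm; exact hmem (by simpa using (PySem.Set.mem_ofList _ _).mpr hm)
      have hgetD : (t.foldl stepG PySem.Dict.empty).getD p.1 [] = [] :=
        PySem.Dict.getD_of_not_contains _ [] hcont
      rw [pv_stepG_add _ _ (by rw [hgetD]; exact rfl), hgetD]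
      rw [PySem.Dict.items_insert_of_not_contains _ _ hcont, ih]
      rw [hkeq, if_neg (by simpa using hmem), List.map_append]
      congr 1
      · apply List.map_congr_left
        intro f hf
        rw [pv_bucket_snoc]
        have : (p.1 == f) = false := by
          simp only [beq_eq_false_iff_ne, ne_eq]
          intro he; exact hmem (he ▸ hf)
        simp [this]
      · simp only [List.map_cons, List.map_nil]
        rw [pv_bucket_snoc, hb]
        simp

-- ===== VERDICT (by name: the statement is the Claim_ definition above) =====
theorem split_edit_multifile_commands_spec : Claim_equal_split_edit_multifile_commands := by
  intro commands diff_format _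
  unfold Spec_split_edit_multifile_commands split_edit_multifile_commands split_edit_multifile_commands_alt
  cases diff_format with
  | false => rfl
  | true =>
    simp only [reduceIte]
    rw [pv_a_eq_stepG, pv_items_stepG, pv_pairs_eq]
    rw [show (pairsOf commands).foldl
        (fun ks p => if ks.contains p.1 then ks else ks ++ [p.1]) [] = keysOf (pairsOf commands)
      from rfl]
    rw [PySem.Dict.items_foldl_insert_fresh _ _ _ _
      (fun a _ => PySem.Dict.contains_empty _)
      (by
        have hnd : (keysOf (pairsOf commands)).Nodup := by
          rw [pv_keysOf_eq_ofList]; exact PySem.Set.nodup_ofList _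
        simpa using hnd)]
    rw [show (PySem.Dict.empty : PySem.Dict (Option String) (List String)).items = [] from rfl,
      List.nil_append]
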